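-- pv_equiv track=rewrite | github.com/pdGruby/cloupy | cloupy/diagrams/walter_lieth.py | get_max_ytick_for_precipitation
-- ===== SOURCE A (Python) =====
-- def get_max_ytick_for_precipitation(precipitation):
--     """Return the highest tick for precipitation for the upper axis in the WL graph"""
--
--     available_ticks = [200, 300, 400, 500, 600,
--                        700, 800, 900, 1000, 1100,
--                        1200, 1300, 1400, 1500, 1600,
--                        1700, 1800, 1900, 2000]
--     max_tick = max(list(precipitation))
--
--     for tick in available_ticks:
--         if tick >= max_tick:
--             return tick
--     raise ValueError(f"Precipitation is too high! {max_tick}")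
-- ===== SOURCE B (Python) =====
-- def get_max_ytick_for_precipitation(precipitation):
--     """Return the highest tick for precipitation for the upper axis in the WL graph"""
--     max_tick = max(list(precipitation))
--     tick = max(200, -(-max_tick // 100) * 100)
--     if tick > 2000:
--         raise ValueError(f"Precipitation is too high! {max_tick}")
--     return tick
-- ===== Notes on version B (the rewrite author's own statement) =====
-- stated objective: simpler
-- what changed: Replaces the linear scan over the hard-coded 19-element tick list with a closed-form ceiling-to-nearest-100 clamped below at 200; the explicit tick table disappears. Pre_ excludes only the inputs where A raises ValueError (empty list, or max > 2000), and B raises the identical exceptions there.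
import Mathlib
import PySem

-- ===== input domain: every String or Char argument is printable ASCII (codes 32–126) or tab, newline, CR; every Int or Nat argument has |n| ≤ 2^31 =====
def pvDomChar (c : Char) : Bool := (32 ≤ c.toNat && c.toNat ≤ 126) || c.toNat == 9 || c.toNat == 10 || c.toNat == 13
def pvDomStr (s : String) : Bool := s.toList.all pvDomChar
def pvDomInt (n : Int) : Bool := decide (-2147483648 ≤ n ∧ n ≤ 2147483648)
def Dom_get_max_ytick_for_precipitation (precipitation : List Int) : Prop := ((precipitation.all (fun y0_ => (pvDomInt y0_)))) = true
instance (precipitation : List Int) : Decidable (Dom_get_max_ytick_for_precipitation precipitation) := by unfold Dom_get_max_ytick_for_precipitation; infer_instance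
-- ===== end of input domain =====

-- B computes the tick by closed-form ceiling division (max 200 (ceil(m/100)*100)) instead of scanning A's hard-coded tick table; simpler, same exceptions.


-- ===== PORT A =====
def pvAvailableTicks : List Int :=
  [200, 300, 400, 500, 600, 700, 800, 900, 1000, 1100,
   1200, 1300, 1400, 1500, 1600, 1700, 1800, 1900, 2000]

-- the for-loop over available_ticks; [] reaches the 'raise' branch (excluded by Pre_), ported as 0
def pvFindTick (m : Int) : List Int → Int
  | [] => 0
  | t :: ts => if t ≥ m then t else pvFindTick m ts

def get_max_ytick_for_precipitation (precipitation : List Int) : Int :=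
  match PySem.List.max? precipitation (fun x => x) with
  | none => 0            -- max([]) raises ValueError; excluded by Pre_
  | some max_tick => pvFindTick max_tick pvAvailableTicks

-- ===== PORT B =====
def get_max_ytick_for_precipitation_alt (precipitation : List Int) : Int :=
  match PySem.List.max? precipitation (fun x => x) with
  | none => 0            -- max([]) raises ValueError; excluded by Pre_
  | some max_tick =>
    let tick := max 200 (-(PySem.Int.floordiv (-max_tick) 100) * 100)
    if tick > 2000 then 0 else tick   -- the raise branch; excluded by Pre_

-- ===== PRECONDITION & SPEC =====
-- Pre_ excludes exactly where the Python A raises ValueError: the empty list, and a maximum above 2000 (B raises identically there).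
def Pre_get_max_ytick_for_precipitation (precipitation : List Int) : Prop :=
  precipitation ≠ [] ∧ ∀ x ∈ precipitation, x ≤ 2000
instance (precipitation : List Int) : Decidable (Pre_get_max_ytick_for_precipitation precipitation) := by unfold Pre_get_max_ytick_for_precipitation; infer_instance
def pvWitness_get_max_ytick_for_precipitation : List Int := [30, 250, -4]

def Spec_get_max_ytick_for_precipitation (precipitation : List Int) (out : Int) : Prop := out = get_max_ytick_for_precipitation_alt precipitation
instance (precipitation : List Int) (out : Int) : Decidable (Spec_get_max_ytick_for_precipitation precipitation out) := by unfold Spec_get_max_ytick_for_precipitation; infer_instance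

-- ===== CLAIM (what is proved, stated in full; the proofs are below) =====
def Claim_equal_get_max_ytick_for_precipitation : Prop := ∀ (precipitation : List Int), Dom_get_max_ytick_for_precipitation precipitation → Pre_get_max_ytick_for_precipitation precipitation → Spec_get_max_ytick_for_precipitation precipitation (get_max_ytick_for_precipitation precipitation)

-- ===== LEMMAS AND PROOFS =====

-- A's scan returns an element ≥ m that is minimal among the ≥-m elements of a sorted tick list
theorem pvFindTick_spec (m : Int) : ∀ ts : List Int, ts.Pairwise (· ≤ ·) →
    (∃ t ∈ ts, m ≤ t) →
    pvFindTick m ts ∈ ts ∧ m ≤ pvFindTick m ts ∧ ∀ u ∈ ts, m ≤ u → pvFindTick m ts ≤ u := by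
  intro ts
  induction ts with
  | nil => rintro _ ⟨t, ht, _⟩; cases ht
  | cons t ts ih =>
    intro hpw hex
    rcases List.pairwise_cons.mp hpw with ⟨hle, hpw'⟩
    by_cases hm : t ≥ m
    · refine ⟨by simp [pvFindTick, hm], by simp [pvFindTick, hm], ?_⟩
      intro u hu _
      simp only [pvFindTick, if_pos hm]
      rcases List.mem_cons.mp hu with rfl | hu'
      · exact le_refl _
      · exact hle u hu'
    · have hex' : ∃ t' ∈ ts, m ≤ t' := by
        rcases hex with ⟨t', ht', hmt'⟩
        rcases List.mem_cons.mp ht' with rfl | h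
        · exact absurd hmt' hm
        · exact ⟨t', h, hmt'⟩
      obtain ⟨h1, h2, h3⟩ := ih hpw' hex'
      refine ⟨by simp [pvFindTick, hm, h1], by simpa [pvFindTick, hm] using h2, ?_⟩
      intro u hu hmu
      simp only [pvFindTick, if_neg hm]
      rcases List.mem_cons.mp hu with rfl | hu'
      · exact absurd hmu hm
      · exact h3 u hu' hmu

-- every clamped multiple k*100 with 2 ≤ k ≤ 20 is in the tick table
theorem pv_mul_mem (k : Int) (h2 : 2 ≤ k) (h20 : k ≤ 20) : k * 100 ∈ pvAvailableTicks := by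
  interval_cases k <;> decide

theorem get_max_ytick_for_precipitation_spec : Claim_equal_get_max_ytick_for_precipitation := by
  intro p _ hpre
  unfold Spec_get_max_ytick_for_precipitation
  unfold get_max_ytick_for_precipitation get_max_ytick_for_precipitation_alt
  obtain ⟨hne, hle⟩ := hpre
  cases hmax : PySem.List.max? p (fun x => x) with
  | none => rfl
  | some m =>
    have hm : m ≤ 2000 := hle m (PySem.List.max?_mem hmax)
    show pvFindTick m pvAvailableTicks =
      (let tick := max 200 (-(PySem.Int.floordiv (-m) 100) * 100)
       if tick > 2000 then 0 else tick)
    have hc : ((-(PySem.Int.floordiv (-m) 100)) - 1) * 100 < m ∧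
        m ≤ (-(PySem.Int.floordiv (-m) 100)) * 100 :=
      (PySem.Int.neg_floordiv_neg_eq_iff_of_pos (a := m) (b := 100)
        (q := -(PySem.Int.floordiv (-m) 100)) (by norm_num)).mp rfl
    generalize -(PySem.Int.floordiv (-m) 100) = c at hc ⊢
    obtain ⟨hc1, hc2⟩ := hc
    have hc20 : c ≤ 20 := by nlinarith
    have hchoice := max_choice 200 (c * 100)
    have h200 : (200 : Int) ≤ max 200 (c * 100) := le_max_left _ _
    have hc100 : c * 100 ≤ max 200 (c * 100) := le_max_right _ _
    have hr2000 : max 200 (c * 100) ≤ 2000 := by rcases hchoice with h | h <;> omega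
    have hmem : max 200 (c * 100) ∈ pvAvailableTicks := by
      rcases hchoice with h | h
      · rw [h]; decide
      · rw [h]; exact pv_mul_mem c (by omega) hc20
    have hmr : m ≤ max 200 (c * 100) := le_trans hc2 hc100
    have hmin : ∀ u ∈ pvAvailableTicks, m ≤ u → max 200 (c * 100) ≤ u := by
      intro u hu hmu
      fin_cases hu <;> (rcases hchoice with h | h <;> omega)
    obtain ⟨h1, h2, h3⟩ := pvFindTick_spec m pvAvailableTicks (by decide)
      ⟨max 200 (c * 100), hmem, hmr⟩
    have heq : pvFindTick m pvAvailableTicks = max 200 (c * 100) :=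
      le_antisymm (h3 _ hmem hmr) (hmin _ h1 h2)
    show pvFindTick m pvAvailableTicks = if max 200 (c * 100) > 2000 then 0 else max 200 (c * 100)
    rw [if_neg (by omega), heq]
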